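-- pv_equiv track=rewrite | github.com/derekgliwa/adventofcode2023 | dec13/part1.py | is_row_symmetric_at_i
-- ===== SOURCE A (Python) =====
-- def is_row_symmetric_at_i(row, i):
--   j = i - 1
--   k = i
--   while j >= 0 and k < len(row):
--     if row[j] != row[k]:
--       return False
--     j = j - 1
--     k = k + 1
--   return True
-- ===== SOURCE B (Python) =====
-- def is_row_symmetric_at_i(row, i):
--     m = min(i, len(row) - i)
--     if m <= 0:
--         return True
--     return row[:i][::-1][:m] == row[i:i+m]
-- ===== Notes on version B (the rewrite author's own statement) =====
-- stated objective: simpler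
-- what changed: Replaces the explicit two-pointer while loop with a single comparison of the reversed left slice against the right slice over their overlap.
import Mathlib
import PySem

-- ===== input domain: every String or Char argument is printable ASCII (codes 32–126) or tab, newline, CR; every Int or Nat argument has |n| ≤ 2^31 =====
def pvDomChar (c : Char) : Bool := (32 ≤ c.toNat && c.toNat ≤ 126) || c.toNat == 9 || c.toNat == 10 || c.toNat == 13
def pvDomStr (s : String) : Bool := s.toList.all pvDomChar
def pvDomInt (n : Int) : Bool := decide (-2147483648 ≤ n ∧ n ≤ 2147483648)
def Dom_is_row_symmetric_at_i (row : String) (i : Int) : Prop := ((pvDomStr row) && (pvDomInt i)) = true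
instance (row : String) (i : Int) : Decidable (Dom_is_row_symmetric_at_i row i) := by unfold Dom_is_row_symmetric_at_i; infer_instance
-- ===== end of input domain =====

-- B replaces A's two-pointer while loop by one comparison of the reversed left slice
-- with the right slice over their overlap (objective: simpler).

-- ===== PORT A =====
-- the while loop of A: j walks left, k walks right
def pvA_loop (cs : List Char) (j k : Int) : Bool :=
  if h : j ≥ 0 ∧ k < (cs.length : Int) then
    if PySem.List.pyGet? cs j ≠ PySem.List.pyGet? cs k then false
    else pvA_loop cs (j - 1) (k + 1)
  else true
termination_by ((cs.length : Int) - k).toNat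
decreasing_by omega

def is_row_symmetric_at_i (row : String) (i : Int) : Bool :=
  pvA_loop row.toList (i - 1) i

-- ===== PORT B =====
def is_row_symmetric_at_i_alt (row : String) (i : Int) : Bool :=
  let cs := row.toList
  let m : Int := min i ((cs.length : Int) - i)
  if m ≤ 0 then true
  else
    -- row[:i][::-1]  (Python reverse slice, ported as List.reverse per slice?_none_none_neg_one)
    let left := (PySem.List.slice cs none (some i)).reverse
    -- row[:i][::-1][:m] == row[i:i+m]
    decide (PySem.List.slice left none (some m) = PySem.List.slice cs (some i) (some (i + m)))

-- ===== PRECONDITION & SPEC =====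
def Spec_is_row_symmetric_at_i (row : String) (i : Int) (out : Bool) : Prop := out = is_row_symmetric_at_i_alt row i
instance (row : String) (i : Int) (out : Bool) : Decidable (Spec_is_row_symmetric_at_i row i out) := by unfold Spec_is_row_symmetric_at_i; infer_instance

-- ===== CLAIM (what is proved, stated in full; the proofs are below) =====
def Claim_equal_is_row_symmetric_at_i : Prop := ∀ (row : String) (i : Int), Dom_is_row_symmetric_at_i row i → Spec_is_row_symmetric_at_i row i (is_row_symmetric_at_i row i)

-- ===== LEMMAS AND PROOFS =====

-- the loop with pointers at offset t from the mirror point equals the slice comparison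
-- with the first t positions already dropped
theorem pvA_loop_eq (cs : List Char) (i' : Nat) (_h1 : 0 < i') (h2 : i' < cs.length) :
    ∀ n t : Nat, t + n = min i' (cs.length - i') →
    pvA_loop cs ((i' : Int) - 1 - t) ((i' : Int) + t) =
      decide ((((cs.take i').reverse.take (min i' (cs.length - i'))).drop t)
            = (((cs.drop i').take (min i' (cs.length - i'))).drop t)) := by
  intro n
  induction n with
  | zero =>
    intro t ht
    rw [pvA_loop]
    rw [dif_neg (by omega)]
    have hL : (((cs.take i').reverse.take (min i' (cs.length - i'))).drop t) = [] := by
      apply List.drop_eq_nil_of_le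
      simp; omega
    have hR : ((((cs.drop i').take (min i' (cs.length - i'))).drop t)) = [] := by
      apply List.drop_eq_nil_of_le
      simp; omega
    rw [hL, hR]; simp
  | succ n ih =>
    intro t ht
    set m := min i' (cs.length - i') with hm
    have htm : t < m := by omega
    rw [pvA_loop]
    rw [dif_pos (by constructor <;> omega)]
    -- both indices are in range; compute the two gets
    have hjn : ((i' : Int) - 1 - t) = ((i' - 1 - t : Nat) : Int) := by omega
    have hkn : ((i' : Int) + t) = ((i' + t : Nat) : Int) := by push_cast; ring
    have hjlt : i' - 1 - t < cs.length := by omega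
    have hklt : i' + t < cs.length := by omega
    rw [hjn, hkn, PySem.List.pyGet?_natCast, PySem.List.pyGet?_natCast,
        List.getElem?_eq_getElem hjlt, List.getElem?_eq_getElem hklt]
    -- express both dropped slices as cons
    have hLlen : ((cs.take i').reverse.take m).length = m := by simp; omega
    have hRlen : ((cs.drop i').take m).length = m := by simp; omega
    have hLd : (((cs.take i').reverse.take m).drop t)
        = cs[i' - 1 - t] :: (((cs.take i').reverse.take m).drop (t + 1)) := by
      rw [List.drop_eq_getElem_cons (by omega)]
      congr 1
      rw [List.getElem_take, List.getElem_reverse, List.getElem_take]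
      congr 1
      simp; omega
    have hRd : (((cs.drop i').take m).drop t)
        = cs[i' + t] :: (((cs.drop i').take m).drop (t + 1)) := by
      rw [List.drop_eq_getElem_cons (by omega)]
      congr 1
      rw [List.getElem_take, List.getElem_drop]
    rw [hLd, hRd]
    by_cases hc : cs[i' - 1 - t] = cs[i' + t]
    · rw [if_neg (by simp [hc])]
      have hj' : ((i' - 1 - t : Nat) : Int) - 1 = ((i' : Int) - 1 - (t + 1 : Nat)) := by
        push_cast; omega
      have hk' : ((i' + t : Nat) : Int) + 1 = ((i' : Int) + (t + 1 : Nat)) := by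
        push_cast; ring
      rw [hj', hk', ih (t + 1) (by omega)]
      simp [hc]
    · rw [if_pos (by simp [hc])]
      simp [hc]

-- ===== VERDICT (by name: the statement is the Claim_ definition above) =====
theorem is_row_symmetric_at_i_spec : Claim_equal_is_row_symmetric_at_i := by
  intro row i _
  unfold Spec_is_row_symmetric_at_i is_row_symmetric_at_i is_row_symmetric_at_i_alt
  set cs := row.toList with hcs
  by_cases hm : min i ((cs.length : Int) - i) ≤ 0
  · rw [if_pos hm]
    rw [pvA_loop, dif_neg (by omega)]
  · rw [if_neg hm]
    have hi0 : 0 < i := by omega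
    have hilen : i < (cs.length : Int) := by omega
    set i' : Nat := i.toNat with hi'
    have hieq : i = (i' : Int) := by omega
    have h1 : 0 < i' := by omega
    have h2 : i' < cs.length := by omega
    set m : Int := min i ((cs.length : Int) - i) with hmdef
    have hmn : m.toNat = min i' (cs.length - i') := by omega
    -- reduce the slices on B's side
    have hs1 : PySem.List.slice cs none (some i) = cs.take i' := by
      rw [PySem.List.slice_to cs (by omega)]
    have hs2 : PySem.List.slice ((cs.take i').reverse) none (some m)
        = ((cs.take i').reverse).take (min i' (cs.length - i')) := by
      rw [PySem.List.slice_to _ (by omega), hmn]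
    have hs3 : PySem.List.slice cs (some i) (some (i + m))
        = (cs.drop i').take (min i' (cs.length - i')) := by
      rw [PySem.List.slice_toNat cs (by omega) (by omega)]
      congr 1
      omega
    rw [hs1]
    show pvA_loop cs (i - 1) i
      = decide (PySem.List.slice ((List.take i' cs).reverse) none (some m)
          = PySem.List.slice cs (some i) (some (i + m)))
    rw [hs2, hs3]
    have := pvA_loop_eq cs i' h1 h2 (min i' (cs.length - i')) 0 (by omega)
    simp only [Nat.cast_zero, sub_zero, add_zero, List.drop_zero] at this
    rw [hieq]
    convert this using 3
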